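-- pv_equiv track=rewrite | github.com/Springo/AdventOfCode2020 | d20.py | rot_tile
-- ===== SOURCE A (Python) =====
-- def rot_tile(tile, rot):
--     res = tile
--     for r in range(rot):
--         new_tile = []
--         for i in range(len(tile)):
--             row = [res[len(tile) - j - 1][i] for j in range(len(tile))]
--             new_tile.append(row)
--         res = new_tile
--     return res
-- ===== SOURCE B (Python) =====
-- def rot_tile(tile, rot):
--     if rot <= 0:
--         return tile
--     k = rot % 4
--     if k == 0:
--         return tile
--     n = len(tile)
--     t = [[tile[j][i] for j in range(n)] for i in range(n)]  # transpose
--     if k == 1: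
--         return [row[::-1] for row in t]
--     if k == 2:
--         return [row[::-1] for row in tile[::-1]]
--     return t[::-1]
-- ===== Notes on version B (the rewrite author's own statement) =====
-- stated objective: faster
-- what changed: B replaces A's rot-fold of index-built 90-degree rotations by a closed-form rot%4 dispatch: one transpose plus row/list reversals, doing at most one pass over the tile instead of rot passes.
-- outside the precondition, e.g. on rot_tile([[1, 2, 3], [4, 5, 6]], 2): A returns [[5, 4], [2, 1]], B returns [[6, 5, 4], [3, 2, 1]]
import Mathlib
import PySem

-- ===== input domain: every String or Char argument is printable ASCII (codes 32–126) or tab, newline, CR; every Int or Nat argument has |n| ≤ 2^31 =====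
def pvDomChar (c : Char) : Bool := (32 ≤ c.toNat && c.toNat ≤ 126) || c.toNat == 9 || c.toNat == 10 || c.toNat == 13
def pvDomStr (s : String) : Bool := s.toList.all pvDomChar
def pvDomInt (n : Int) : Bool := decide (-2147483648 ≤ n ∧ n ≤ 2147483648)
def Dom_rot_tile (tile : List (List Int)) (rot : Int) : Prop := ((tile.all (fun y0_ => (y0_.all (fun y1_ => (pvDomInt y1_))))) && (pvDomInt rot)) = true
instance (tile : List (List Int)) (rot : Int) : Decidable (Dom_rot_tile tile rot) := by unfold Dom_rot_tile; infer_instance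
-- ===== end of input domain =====

-- B replaces A's rot-fold of index-built 90° rotations by a closed-form rot%4 dispatch
-- (one transpose plus reversals); proved equal on square tiles (and whenever rot ≤ 0).

-- ===== PORT A =====
def rot_tile (tile : List (List Int)) (rot : Int) : List (List Int) :=
  (PySem.List.pyRange 0 rot 1).foldl (fun res _r =>
    (PySem.List.pyRange 0 (PySem.List.len tile) 1).foldl (fun new_tile i =>
      new_tile ++ [(PySem.List.pyRange 0 (PySem.List.len tile) 1).map (fun j =>
        PySem.List.pyGetD (PySem.List.pyGetD res (PySem.List.len tile - j - 1) []) i 0)]) []) tile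

-- ===== PORT B =====
-- row[::-1] / t[::-1] are exact list reversal (PySem.List.slice?_none_none_neg_one)
def rot_tile_alt (tile : List (List Int)) (rot : Int) : List (List Int) :=
  if rot ≤ 0 then tile
  else
    let k := PySem.Int.mod rot 4
    if k = 0 then tile
    else
      let t := (PySem.List.pyRange 0 (PySem.List.len tile) 1).map (fun i =>
        (PySem.List.pyRange 0 (PySem.List.len tile) 1).map (fun j =>
          PySem.List.pyGetD (PySem.List.pyGetD tile j []) i 0))
      if k = 1 then t.map List.reverse
      else if k = 2 then tile.reverse.map List.reverse
      else t.reverse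

-- ===== PRECONDITION & SPEC =====
-- Pre_ excludes ragged (non-square) tiles when rot ≥ 1 and rot % 4 ∈ {0, 2}: there A either
-- raises IndexError (a row shorter than len(tile)) or silently crops the tile to
-- len(tile)×len(tile), an accident of its index arithmetic that B (which returns the tile
-- unchanged for rot % 4 == 0 and reverses whole rows for rot % 4 == 2) does not reproduce;
-- for rot % 4 ∈ {1, 3} both programs crop identically, so rows at least len(tile) long are admitted.
def Pre_rot_tile (tile : List (List Int)) (rot : Int) : Prop :=
  rot ≤ 0 ∨ (∀ row ∈ tile, row.length = tile.length) ∨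
    ((PySem.Int.mod rot 4 = 1 ∨ PySem.Int.mod rot 4 = 3) ∧
      ∀ row ∈ tile, tile.length ≤ row.length)
instance (tile : List (List Int)) (rot : Int) : Decidable (Pre_rot_tile tile rot) := by
  unfold Pre_rot_tile; infer_instance
def pvWitness_rot_tile : List (List Int) × Int := ([[1, 2], [3, 4]], 1)

def Spec_rot_tile (tile : List (List Int)) (rot : Int) (out : List (List Int)) : Prop := out = rot_tile_alt tile rot
instance (tile : List (List Int)) (rot : Int) (out : List (List Int)) : Decidable (Spec_rot_tile tile rot out) := by unfold Spec_rot_tile; infer_instance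

-- ===== CLAIM (what is proved, stated in full; the proofs are below) =====
def Claim_equal_rot_tile : Prop := ∀ (tile : List (List Int)) (rot : Int), Dom_rot_tile tile rot → Pre_rot_tile tile rot → Spec_rot_tile tile rot (rot_tile tile rot)

-- ===== LEMMAS AND PROOFS =====

-- entry (i, j) of a matrix, defaulting to 0
def pvGetE (m : List (List Int)) (i j : Nat) : Int := (m.getD i []).getD j 0

-- the n×n matrix with entries f i j
def pvMk (n : Nat) (f : Nat → Nat → Int) : List (List Int) :=
  (List.range n).map (fun i => (List.range n).map (f i))

-- one iteration of A's loop body, as a matrix builder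
def pvStep (n : Nat) (m : List (List Int)) : List (List Int) :=
  pvMk n (fun i j => pvGetE m (n - 1 - j) i)

def pvSq (n : Nat) (m : List (List Int)) : Prop :=
  m.length = n ∧ ∀ r ∈ m, r.length = n

theorem pvGetE_mk {n : Nat} (f : Nat → Nat → Int) {i j : Nat} (hi : i < n) (hj : j < n) :
    pvGetE (pvMk n f) i j = f i j := by
  simp [pvGetE, pvMk, List.getD_eq_getElem?_getD, hi, hj]

theorem pvMk_congr {n : Nat} {f g : Nat → Nat → Int}
    (h : ∀ i < n, ∀ j < n, f i j = g i j) : pvMk n f = pvMk n g := by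
  unfold pvMk
  apply List.ext_getElem (by simp)
  intro i h1 h2
  simp only [List.getElem_map, List.getElem_range]
  apply List.ext_getElem (by simp)
  intro j h3 h4
  simp only [List.getElem_map, List.getElem_range]
  exact h i (by simpa using h1) j (by simpa using h3)

theorem pvSq_mk (n : Nat) (f : Nat → Nat → Int) : pvSq n (pvMk n f) := by
  constructor
  · simp [pvMk]
  · intro r hr
    simp only [pvMk, List.mem_map] at hr
    obtain ⟨i, _, rfl⟩ := hr
    simp

theorem pvSq_eq_mk {n : Nat} {m : List (List Int)} (h : pvSq n m) :
    m = pvMk n (fun i j => pvGetE m i j) := by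
  obtain ⟨hl, hr⟩ := h
  apply List.ext_getElem (by simp [pvMk, hl])
  intro i h1 h2
  simp only [pvMk, List.getElem_map, List.getElem_range]
  apply List.ext_getElem
  · simp [hr m[i] (List.getElem_mem h1)]
  · intro j h3 h4
    simp only [List.getElem_map, List.getElem_range]
    simp only [pvGetE, List.getD_eq_getElem?_getD]
    rw [List.getElem?_eq_getElem h1, Option.getD_some, List.getElem?_eq_getElem h3,
      Option.getD_some]

theorem pvStep_mk (n : Nat) (f : Nat → Nat → Int) :
    pvStep n (pvMk n f) = pvMk n (fun i j => f (n - 1 - j) i) := by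
  unfold pvStep
  apply pvMk_congr
  intro i hi j hj
  exact pvGetE_mk f (by omega) hi

theorem pvMk_reverse (n : Nat) (f : Nat → Nat → Int) :
    (pvMk n f).reverse = pvMk n (fun i j => f (n - 1 - i) j) := by
  unfold pvMk
  apply List.ext_getElem (by simp)
  intro i h1 h2
  simp only [List.length_reverse, List.length_map, List.length_range] at h1 h2
  simp only [List.getElem_reverse, List.getElem_map, List.getElem_range, List.length_map,
    List.length_range]

theorem pvMk_map_reverse (n : Nat) (f : Nat → Nat → Int) :
    (pvMk n f).map List.reverse = pvMk n (fun i j => f i (n - 1 - j)) := by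
  unfold pvMk
  rw [List.map_map]
  apply List.map_congr_left
  intro i _
  simp only [Function.comp]
  apply List.ext_getElem (by simp)
  intro j h1 h2
  simp only [List.length_reverse, List.length_map, List.length_range] at h1 h2
  simp only [List.getElem_reverse, List.getElem_map, List.getElem_range, List.length_map,
    List.length_range]

-- A's loop body equals pvStep
theorem pvBodyA (tile res : List (List Int)) :
    (PySem.List.pyRange 0 (PySem.List.len tile) 1).foldl (fun new_tile i =>
      new_tile ++ [(PySem.List.pyRange 0 (PySem.List.len tile) 1).map (fun j =>
        PySem.List.pyGetD (PySem.List.pyGetD res (PySem.List.len tile - j - 1) []) i 0)]) []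
    = pvStep tile.length res := by
  rw [PySem.List.foldl_append_singleton_eq_map, List.nil_append]
  simp only [PySem.List.len_eq, PySem.List.pyRange_zero_natCast, List.map_map]
  unfold pvStep pvMk
  apply List.map_congr_left
  intro i hi
  simp only [Function.comp]
  apply List.map_congr_left
  intro j hj
  simp only [List.mem_range] at hi hj
  have e : (tile.length : Int) - ↑j - 1 = ((tile.length - 1 - j : Nat) : Int) := by omega
  simp only [Function.comp_apply]
  rw [e]
  simp [pvGetE]

-- the transpose expression in B
theorem pvBodyB (tile : List (List Int)) :
    (PySem.List.pyRange 0 (PySem.List.len tile) 1).map (fun i =>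
      (PySem.List.pyRange 0 (PySem.List.len tile) 1).map (fun j =>
        PySem.List.pyGetD (PySem.List.pyGetD tile j []) i 0))
    = pvMk tile.length (fun i j => pvGetE tile j i) := by
  simp only [PySem.List.len_eq, PySem.List.pyRange_zero_natCast, List.map_map]
  unfold pvMk
  apply List.map_congr_left
  intro i _
  simp only [Function.comp]
  apply List.map_congr_left
  intro j _
  simp [pvGetE]

theorem pvFoldIter {α : Type} (l : List Int) (f : α → α) (x : α) :
    l.foldl (fun r _ => f r) x = f^[l.length] x := by
  induction l generalizing x with
  | nil => rfl
  | cons a t ih => simp [List.foldl_cons, ih, Function.iterate_succ_apply]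

theorem pvStep4 {n : Nat} {m : List (List Int)} (h : pvSq n m) :
    pvStep n (pvStep n (pvStep n (pvStep n m))) = m := by
  conv_lhs => rw [pvSq_eq_mk h]
  rw [pvStep_mk, pvStep_mk, pvStep_mk, pvStep_mk]
  rw [show m = pvMk n (fun i j => pvGetE m i j) from pvSq_eq_mk h]
  apply pvMk_congr
  intro i hi j hj
  have e1 : n - 1 - (n - 1 - i) = i := by omega
  have e2 : n - 1 - (n - 1 - j) = j := by omega
  rw [e1, e2]
  exact pvGetE_mk _ hi hj

theorem pvIterMod {n : Nat} {m : List (List Int)} (h : pvSq n m) (q r : Nat) :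
    (pvStep n)^[4 * q + r] m = (pvStep n)^[r] m := by
  induction q with
  | zero => simp
  | succ q ih =>
    have : 4 * (q + 1) + r = (4 * q + r) + 4 := by omega
    rw [this, Function.iterate_add_apply]
    have h4 : (pvStep n)^[4] m = pvStep n (pvStep n (pvStep n (pvStep n m))) := by
      simp [Function.iterate_succ_apply']
    rw [h4, pvStep4 h, ih]

-- B's three branches, expressed through pvStep
theorem pvB1 (n : Nat) (m : List (List Int)) :
    pvStep n m = (pvMk n (fun i j => pvGetE m j i)).map List.reverse := by
  rw [pvMk_map_reverse]
  rfl

theorem pvB2 {n : Nat} {m : List (List Int)} (h : pvSq n m) :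
    pvStep n (pvStep n m) = m.reverse.map List.reverse := by
  conv_rhs => rw [pvSq_eq_mk h]
  rw [pvMk_reverse, pvMk_map_reverse]
  conv_lhs => rw [pvSq_eq_mk h]
  rw [pvStep_mk, pvStep_mk]

theorem pvB3 (n : Nat) (m : List (List Int)) :
    pvStep n (pvStep n (pvStep n m))
    = (pvMk n (fun i j => pvGetE m j i)).reverse := by
  rw [pvMk_reverse]
  have h1 : pvStep n m = pvMk n (fun i j => pvGetE m (n - 1 - j) i) := rfl
  rw [h1, pvStep_mk, pvStep_mk]
  apply pvMk_congr
  intro i hi j hj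
  have e : n - 1 - (n - 1 - j) = j := by omega
  rw [e]

-- ===== VERDICT (by name: the statement is the Claim_ definition above) =====
theorem rot_tile_spec : Claim_equal_rot_tile := by
  intro tile rot _dom hpre
  unfold Spec_rot_tile
  by_cases hle : rot ≤ 0
  · unfold rot_tile rot_tile_alt
    rw [PySem.List.pyRange_one_eq_nil hle]
    simp [hle]
  · have hA : rot_tile tile rot = (pvStep tile.length)^[rot.toNat] tile := by
      unfold rot_tile
      simp only [pvBodyA]
      rw [pvFoldIter]
      congr 1
      simp [PySem.List.length_pyRange_one]
    have hmod : PySem.Int.mod rot 4 = ((rot.toNat % 4 : Nat) : Int) := by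
      rw [PySem.Int.mod_eq_emod_of_pos (by omega)]
      omega
    have hsplit : rot.toNat = 4 * (rot.toNat / 4) + rot.toNat % 4 := by omega
    rw [hA, hsplit]
    have hr4 : rot.toNat % 4 < 4 := by omega
    set r := rot.toNat % 4 with hrdef
    interval_cases r
    · -- rot % 4 == 0: only reachable inside Pre_ with a square tile
      have hsq : pvSq tile.length tile := by
        refine ⟨rfl, ?_⟩
        rcases hpre with h | h | ⟨hk, _⟩
        · omega
        · exact h
        · rw [hmod] at hk
          norm_num at hk
      have hm : PySem.Int.mod rot 4 = 0 := by rw [hmod]; norm_num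
      rw [pvIterMod hsq]
      simp only [rot_tile_alt, if_neg hle, hm, Function.iterate_zero, id]
      norm_num
    · -- rot % 4 == 1: a single cropping rotation on both sides, any row lengths
      have hm : PySem.Int.mod rot 4 = 1 := by rw [hmod]; norm_num
      rw [Function.iterate_add_apply]
      have hsq1 : pvSq tile.length (pvStep tile.length tile) := pvSq_mk _ _
      have h40 : (pvStep tile.length)^[4 * (rot.toNat / 4)] (pvStep tile.length tile)
          = pvStep tile.length tile := by
        simpa using pvIterMod hsq1 (rot.toNat / 4) 0
      rw [show ((pvStep tile.length)^[1] tile) = pvStep tile.length tile from rfl, h40]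
      simp only [rot_tile_alt, if_neg hle, hm, pvBodyB]
      norm_num
      exact pvB1 tile.length tile
    · -- rot % 4 == 2: only reachable inside Pre_ with a square tile
      have hsq : pvSq tile.length tile := by
        refine ⟨rfl, ?_⟩
        rcases hpre with h | h | ⟨hk, _⟩
        · omega
        · exact h
        · rw [hmod] at hk
          norm_num at hk
      have hm : PySem.Int.mod rot 4 = 2 := by rw [hmod]; norm_num
      rw [pvIterMod hsq]
      simp only [rot_tile_alt, if_neg hle, hm]
      norm_num
      rw [← List.map_reverse]
      exact pvB2 hsq
    · -- rot % 4 == 3: three cropping rotations on both sides, any row lengths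
      have hm : PySem.Int.mod rot 4 = 3 := by rw [hmod]; norm_num
      have e : 4 * (rot.toNat / 4) + 3 = (4 * (rot.toNat / 4) + 2) + 1 := by omega
      rw [e, Function.iterate_add_apply]
      have hsq1 : pvSq tile.length (pvStep tile.length tile) := pvSq_mk _ _
      have h42 : (pvStep tile.length)^[4 * (rot.toNat / 4) + 2] (pvStep tile.length tile)
          = (pvStep tile.length)^[2] (pvStep tile.length tile) := pvIterMod hsq1 (rot.toNat / 4) 2
      rw [show ((pvStep tile.length)^[1] tile) = pvStep tile.length tile from rfl, h42]
      simp only [rot_tile_alt, if_neg hle, hm, pvBodyB]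
      norm_num
      exact pvB3 tile.length tile
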